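-- pv_equiv track=rewrite | github.com/hahaha211/SM3-Rho-Attack | sm3rhoattack.py | fillFunc
-- ===== SOURCE A (Python) =====
-- def Int2Bin(octs, ra):
--     bins = list(bin(octs)[2:])
--     #补零
--     for i in range(0, ra - len(bins)):
--         bins.insert(0, '0')
--     return ''.join(bins)
--
-- def fillFunc(mess):
--     mess = bin(mess)[2:]
--     for i in range(4):
--         if (len(mess) % 4 == 0):
--             break
--         else:
--             mess = '0' + mess
--     length = len(mess)
--     k = 448 - (length + 1) % 512
--     if (k < 0):
--         k += 512
--     addM = '1' + '0' * k + Int2Bin(length, 64)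
--     mess += addM
--     return mess
-- ===== SOURCE B (Python) =====
-- def fillFunc(mess):
--     L = ((max(mess.bit_length(), 1) + 3) // 4) * 4
--     k = (448 - (L + 1)) % 512
--     N = (mess << (1 + k + 64)) + (1 << (k + 64)) + L
--     return format(N, '0{}b'.format(L + 1 + k + 64))
-- ===== Notes on version B (the rewrite author's own statement) =====
-- stated objective: alternative
-- what changed: B abandons A's string-assembly (pad loop, sign-fixup branch, Int2Bin insertion loop, concatenations) and instead computes the padded-to-nibble width from bit_length, assembles the entire padded message as ONE big integer by shifting and adding the '1' bit and the 64-bit length field, and renders it once with a zero-filled binary format.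
import Mathlib
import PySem

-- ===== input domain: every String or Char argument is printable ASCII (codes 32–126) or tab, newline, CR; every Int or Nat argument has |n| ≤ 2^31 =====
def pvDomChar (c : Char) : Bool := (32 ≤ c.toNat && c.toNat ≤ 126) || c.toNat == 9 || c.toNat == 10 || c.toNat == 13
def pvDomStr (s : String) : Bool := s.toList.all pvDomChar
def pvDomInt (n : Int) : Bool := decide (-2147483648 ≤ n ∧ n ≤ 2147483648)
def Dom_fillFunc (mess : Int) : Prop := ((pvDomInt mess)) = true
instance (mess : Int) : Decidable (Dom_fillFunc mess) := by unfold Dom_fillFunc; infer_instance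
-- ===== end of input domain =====

-- B assembles the whole padded message as one big integer (shift/add of the message,
-- the '1' bit and the 64-bit length field) rendered once in zero-filled binary,
-- instead of A's loop-by-loop string assembly; objective: alternative (same cost).

-- ===== PORT A =====
-- the 'for i in range(4): if len%4==0: break else mess = '0'+mess' loop, fuel = 4
def padLoop : Nat → List Char → List Char
  | 0, m => m
  | n+1, m =>
      if PySem.Int.mod (PySem.List.len m) 4 = 0 then m
      else padLoop n ('0' :: m)

def Int2Bin (octs : Int) (ra : Int) : List Char :=
  let bins := PySem.List.slice (PySem.Int.toBinChars0b octs) (some 2) none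
  -- for i in range(0, ra - len(bins)): bins.insert(0, '0')
  let bins := (PySem.List.pyRange 0 (ra - PySem.List.len bins) 1).foldl
                (fun b _ => PySem.List.insert b 0 '0') bins
  bins  -- ''.join(bins) of single chars: the same character list

def fillFunc (mess : Int) : String :=
  let m := PySem.List.slice (PySem.Int.toBinChars0b mess) (some 2) none
  let m := padLoop 4 m
  let length := PySem.List.len m
  let k := 448 - PySem.Int.mod (length + 1) 512
  let k := if k < 0 then k + 512 else k
  let addM := '1' :: (PySem.List.pyRepeat ['0'] k ++ Int2Bin length 64)
  String.ofList (m ++ addM)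

-- ===== PORT B =====
-- L = ((max(mess.bit_length(), 1) + 3) // 4) * 4
-- k = (448 - (L + 1)) % 512
-- N = (mess << (1 + k + 64)) + (1 << (k + 64)) + L
-- return format(N, '0{}b'.format(L + 1 + k + 64))   -- = bin zero-filled to that width
def fillFunc_alt (mess : Int) : String :=
  let L : Int := PySem.Int.floordiv (max ((PySem.Int.bitLength mess : Nat) : Int) 1 + 3) 4 * 4
  let k : Int := PySem.Int.mod (448 - (L + 1)) 512
  let N : Int := mess <<< (1 + k + 64).toNat + 1 <<< (k + 64).toNat + L
  String.ofList (PySem.Chars.zfill (PySem.Int.toBinChars N) (L + 1 + k + 64))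

-- ===== PRECONDITION & SPEC =====
-- Pre_ excludes negative mess, outside the padding function's natural domain, where A's
-- bin(mess)[2:] leaves a stray 'b' in the output and B's binary formatting leaves a '-' —
-- both accidental artefacts of rendering a negative integer, neither worth specifying.
def Pre_fillFunc (mess : Int) : Prop := 0 ≤ mess
instance (mess : Int) : Decidable (Pre_fillFunc mess) := by unfold Pre_fillFunc; infer_instance
def pvWitness_fillFunc : Int := (5)

def Spec_fillFunc (mess : Int) (out : String) : Prop := out = fillFunc_alt mess
instance (mess : Int) (out : String) : Decidable (Spec_fillFunc mess out) := by unfold Spec_fillFunc; infer_instance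

-- ===== CLAIM (what is proved, stated in full; the proofs are below) =====
def Claim_equal_fillFunc : Prop := ∀ (mess : Int), Dom_fillFunc mess → Pre_fillFunc mess → Spec_fillFunc mess (fillFunc mess)

-- ===== LEMMAS AND PROOFS =====

lemma mod_four_eq (a : Int) : PySem.Int.mod a 4 = a % 4 := by
  simp [PySem.Int.mod, Int.fmod_eq_emod]

lemma mod_512_eq (a : Int) : PySem.Int.mod a 512 = a % 512 := by
  simp [PySem.Int.mod, Int.fmod_eq_emod]

lemma padLoop_done (f : Nat) (m : List Char) (h : m.length % 4 = 0) : padLoop f m = m := by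
  cases f with
  | zero => rfl
  | succ f =>
      have : PySem.Int.mod (PySem.List.len m) 4 = 0 := by
        simp only [mod_four_eq, PySem.List.len]; omega
      simp only [padLoop]
      rw [if_pos this]

lemma padLoop_step (f : Nat) (m : List Char) (h : m.length % 4 ≠ 0) :
    padLoop (f + 1) m = padLoop f ('0' :: m) := by
  have : ¬ PySem.Int.mod (PySem.List.len m) 4 = 0 := by
    simp only [mod_four_eq, PySem.List.len]; omega
  simp only [padLoop]
  rw [if_neg this]

lemma pad_eq (s : List Char) :
    padLoop 4 s = PySem.List.pyRepeat ['0'] (PySem.Int.mod (-(PySem.List.len s)) 4) ++ s := by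
  have hrep : ∀ k : Int, PySem.List.pyRepeat (['0'] : List Char) k = List.replicate k.toNat '0' :=
    fun k => PySem.List.pyRepeat_singleton '0' k
  have h : s.length % 4 = 0 ∨ s.length % 4 = 1 ∨ s.length % 4 = 2 ∨ s.length % 4 = 3 := by omega
  rcases h with h | h | h | h
  · rw [padLoop_done 4 s h, hrep]
    have hmod : PySem.Int.mod (-(PySem.List.len s)) 4 = 0 := by
      simp only [mod_four_eq, PySem.List.len]; omega
    rw [hmod]; simp
  · rw [padLoop_step 3 s (by omega), padLoop_step 2 _ (by simp; omega),
        padLoop_step 1 _ (by simp; omega), padLoop_done 1 _ (by simp; omega), hrep]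
    have hmod : PySem.Int.mod (-(PySem.List.len s)) 4 = 3 := by
      simp only [mod_four_eq, PySem.List.len]; omega
    rw [hmod]; rfl
  · rw [padLoop_step 3 s (by omega), padLoop_step 2 _ (by simp; omega),
        padLoop_done 2 _ (by simp; omega), hrep]
    have hmod : PySem.Int.mod (-(PySem.List.len s)) 4 = 2 := by
      simp only [mod_four_eq, PySem.List.len]; omega
    rw [hmod]; rfl
  · rw [padLoop_step 3 s (by omega), padLoop_done 3 _ (by simp; omega), hrep]
    have hmod : PySem.Int.mod (-(PySem.List.len s)) 4 = 1 := by
      simp only [mod_four_eq, PySem.List.len]; omega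
    rw [hmod]; rfl

lemma k_eq (L : Int) :
    (if 448 - PySem.Int.mod (L + 1) 512 < 0
       then 448 - PySem.Int.mod (L + 1) 512 + 512
       else 448 - PySem.Int.mod (L + 1) 512)
      = PySem.Int.mod (448 - (L + 1)) 512 := by
  simp only [mod_512_eq]
  split_ifs <;> omega

lemma digitChar_not_sign (m : Nat) : Nat.digitChar m ≠ '+' ∧ Nat.digitChar m ≠ '-' := by
  rcases Nat.lt_or_ge m 16 with h | h
  · interval_cases m <;> exact ⟨by decide, by decide⟩
  · have hstar : Nat.digitChar m = '*' := by
      have h0 : m ≠ 0 := by omega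
      have h1 : m ≠ 1 := by omega
      have h2 : m ≠ 2 := by omega
      have h3 : m ≠ 3 := by omega
      have h4 : m ≠ 4 := by omega
      have h5 : m ≠ 5 := by omega
      have h6 : m ≠ 6 := by omega
      have h7 : m ≠ 7 := by omega
      have h8 : m ≠ 8 := by omega
      have h9 : m ≠ 9 := by omega
      have h10 : m ≠ 10 := by omega
      have h11 : m ≠ 11 := by omega
      have h12 : m ≠ 12 := by omega
      have h13 : m ≠ 13 := by omega
      have h14 : m ≠ 14 := by omega
      have h15 : m ≠ 15 := by omega
      simp [Nat.digitChar, h0, h1, h2, h3, h4, h5, h6, h7, h8, h9, h10, h11, h12, h13, h14, h15]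
    rw [hstar]
    exact ⟨by decide, by decide⟩

lemma toDigitsCore_not_sign (b f n : Nat) (acc : List Char)
    (hacc : ∀ c ∈ acc, c ≠ '+' ∧ c ≠ '-') :
    ∀ c ∈ Nat.toDigitsCore b f n acc, c ≠ '+' ∧ c ≠ '-' := by
  induction f generalizing n acc with
  | zero => simpa [Nat.toDigitsCore] using hacc
  | succ f ih =>
      intro c hc
      simp only [Nat.toDigitsCore] at hc
      split at hc
      · rcases List.mem_cons.mp hc with h | h
        · exact h ▸ digitChar_not_sign _
        · exact hacc _ h
      · exact ih _ _ (by
          intro c hc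
          rcases List.mem_cons.mp hc with h | h
          · exact h ▸ digitChar_not_sign _
          · exact hacc _ h) c hc

lemma toDigits_not_sign (n : Nat) : ∀ c ∈ Nat.toDigits 2 n, c ≠ '+' ∧ c ≠ '-' :=
  toDigitsCore_not_sign 2 (n + 1) n [] (by simp)

lemma foldl_prepend (l : List Int) (bins : List Char) :
    l.foldl (fun b _ => PySem.List.insert b 0 '0') bins
      = List.replicate l.length '0' ++ bins := by
  induction l generalizing bins with
  | nil => simp
  | cons x xs ih =>
      simp [List.foldl_cons, PySem.List.insert_zero, List.replicate_succ']

lemma pyRange_len (t : Int) : (PySem.List.pyRange 0 t 1).length = t.toNat := by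
  simp only [PySem.List.pyRange]
  split_ifs <;> simp <;> omega

lemma int2bin_eq (L : Int) (hL : 0 ≤ L) :
    Int2Bin L 64 = PySem.Chars.zfill (PySem.Int.toBinChars L) 64 := by
  unfold Int2Bin
  rw [PySem.List.slice_from _ (by norm_num : (0:Int) ≤ 2)]
  have hnb : PySem.Int.toBinChars0b L = '0' :: 'b' :: Nat.toDigits 2 L.toNat := by
    simp [PySem.Int.toBinChars0b, not_lt.mpr hL]
  have hb : PySem.Int.toBinChars L = Nat.toDigits 2 L.toNat := by
    simp [PySem.Int.toBinChars, not_lt.mpr hL]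
  rw [hnb, hb]
  show (PySem.List.pyRange 0 (64 - PySem.List.len (('0' :: 'b' :: Nat.toDigits 2 L.toNat).drop (2:Int).toNat)) 1).foldl
        (fun b _ => PySem.List.insert b 0 '0') (('0' :: 'b' :: Nat.toDigits 2 L.toNat).drop (2:Int).toNat)
      = PySem.Chars.zfill (Nat.toDigits 2 L.toNat) 64
  have hdrop : (('0' :: 'b' :: Nat.toDigits 2 L.toNat).drop (2:Int).toNat)
      = Nat.toDigits 2 L.toNat := rfl
  rw [hdrop, foldl_prepend, pyRange_len]
  rcases hdd : Nat.toDigits 2 L.toNat with _ | ⟨c, rest⟩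
  · simp [PySem.Chars.zfill, PySem.List.len]
  · have hc : c ≠ '+' ∧ c ≠ '-' :=
      toDigits_not_sign L.toNat c (by rw [hdd]; exact List.mem_cons_self)
    by_cases h : (64:Int) ≤ ((c :: rest).length : Int)
    · have h0 : (64 - PySem.List.len (c :: rest)).toNat = 0 := by
        simp only [PySem.List.len]; omega
      rw [h0]
      unfold PySem.Chars.zfill
      rw [if_pos (by simpa using h)]
      simp
    · simp only [PySem.Chars.zfill, PySem.List.len]
      rw [if_neg (by omega)]
      rw [if_neg (by tauto)]
      have he : (64 - ((c :: rest).length : Int)).toNat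
          = Int.toNat 64 - (c :: rest).length := by push_cast at h ⊢; omega
      rw [he]

-- ---- binary-digit machinery for the B side ----

-- accumulator law for Nat.toDigitsCore
lemma toDigitsCore_acc (b f : Nat) : ∀ (n : Nat) (acc : List Char),
    Nat.toDigitsCore b f n acc = Nat.toDigitsCore b f n [] ++ acc := by
  induction f with
  | zero => intro n acc; simp [Nat.toDigitsCore]
  | succ f ih =>
      intro n acc
      simp only [Nat.toDigitsCore]
      split
      · simp
      · rw [ih (n / b) [Nat.digitChar (n % b)],
            ih (n / b) (Nat.digitChar (n % b) :: acc), List.append_assoc]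
        rfl

lemma toDigitsCore_fuel : ∀ (m f : Nat), m < f →
    Nat.toDigitsCore 2 f m [] = Nat.toDigits 2 m := by
  intro m
  induction m using Nat.strong_induction_on with
  | _ m ih =>
      intro f hf
      match f with
      | f + 1 =>
        show Nat.toDigitsCore 2 (f+1) m [] = Nat.toDigitsCore 2 (m+1) m []
        simp only [Nat.toDigitsCore]
        split
        · rfl
        · rename_i hne
          rw [toDigitsCore_acc 2 f, toDigitsCore_acc 2 m]
          have hlt : m / 2 < m := by omega
          rw [ih (m / 2) hlt f (by omega), ih (m / 2) hlt m (by omega)]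

lemma toDigits_two_rec (n : Nat) (h : 2 ≤ n) :
    Nat.toDigits 2 n = Nat.toDigits 2 (n / 2) ++ [Nat.digitChar (n % 2)] := by
  show Nat.toDigitsCore 2 (n+1) n [] = _
  simp only [Nat.toDigitsCore]
  rw [if_neg (by omega)]
  rw [toDigitsCore_acc 2 n, toDigitsCore_fuel (n / 2) n (by omega)]

lemma toDigits_two_small (n : Nat) (h : n < 2) : Nat.toDigits 2 n = [Nat.digitChar n] := by
  interval_cases n <;> rfl

lemma toDigits_two_ne_nil (n : Nat) : Nat.toDigits 2 n ≠ [] := by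
  rcases Nat.lt_or_ge n 2 with h | h
  · rw [toDigits_two_small n h]; simp
  · rw [toDigits_two_rec n h]; simp

-- big-endian fixed-width binary rendering of b mod 2^e
def bitsW : Nat → Nat → List Char
  | 0, _ => []
  | e+1, b => bitsW e (b / 2) ++ [Nat.digitChar (b % 2)]

lemma bitsW_zero (e : Nat) : bitsW e 0 = List.replicate e '0' := by
  induction e with
  | zero => rfl
  | succ e ih => simp [bitsW, ih, List.replicate_succ']; rfl

lemma toDigits_mul_pow_add : ∀ (e a b : Nat), 0 < a → b < 2 ^ e →
    Nat.toDigits 2 (a * 2 ^ e + b) = Nat.toDigits 2 a ++ bitsW e b := by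
  intro e
  induction e with
  | zero =>
      intro a b ha hb
      have : b = 0 := by omega
      simp [this, bitsW]
  | succ e ih =>
      intro a b ha hb
      have h2 : (2:Nat) ^ (e+1) = 2 * 2 ^ e := by ring
      have hpow : 0 < (2:Nat) ^ e := pow_pos (by omega) e
      rw [h2] at hb ⊢
      have hn2 : 2 ≤ a * (2 * 2 ^ e) + b := by nlinarith
      rw [toDigits_two_rec _ hn2]
      have hkey : a * (2 * 2 ^ e) + b = 2 * (a * 2 ^ e) + b := by ring
      have hdiv : (a * (2 * 2 ^ e) + b) / 2 = a * 2 ^ e + b / 2 := by rw [hkey]; omega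
      have hmod : (a * (2 * 2 ^ e) + b) % 2 = b % 2 := by rw [hkey]; omega
      rw [hdiv, hmod, ih a (b / 2) ha (by omega)]
      simp [bitsW]

lemma bitsW_eq_replicate : ∀ (e b : Nat), 0 < e → b < 2 ^ e →
    bitsW e b = List.replicate (e - (Nat.toDigits 2 b).length) '0' ++ Nat.toDigits 2 b := by
  intro e
  induction e with
  | zero => intro b h; omega
  | succ e ih =>
      intro b _ hb
      rcases Nat.lt_or_ge b 2 with hsm | hge
      · have hb2 : b / 2 = 0 := by omega
        have hbm : b % 2 = b := by omega
        rw [toDigits_two_small b hsm]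
        show bitsW e (b / 2) ++ [Nat.digitChar (b % 2)] = _
        rw [hb2, hbm, bitsW_zero]
        simp [List.length]
      · have he : 0 < e := by
          by_contra h
          have : e = 0 := by omega
          subst this
          simp at hb; omega
        have h2 : (2:Nat) ^ (e+1) = 2 * 2 ^ e := by ring
        have hrec := toDigits_two_rec b hge
        have hlen1 : 1 ≤ (Nat.toDigits 2 (b / 2)).length :=
          List.length_pos_iff.mpr (toDigits_two_ne_nil _)
        show bitsW e (b / 2) ++ [Nat.digitChar (b % 2)] = _
        rw [ih (b / 2) he (by rw [h2] at hb; omega), hrec]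
        rw [List.append_assoc]
        have hcnt : e - (Nat.toDigits 2 (b / 2)).length
            = e + 1 - (Nat.toDigits 2 (b / 2) ++ [Nat.digitChar (b % 2)]).length := by
          simp only [List.length_append, List.length_cons, List.length_nil]
          omega
        rw [hcnt]

lemma bitsW_add : ∀ (e j b : Nat), b < 2 ^ e →
    bitsW (j + e) b = List.replicate j '0' ++ bitsW e b := by
  intro e
  induction e with
  | zero =>
      intro j b hb
      have : b = 0 := by omega
      simp [this, bitsW_zero, bitsW]
  | succ e ih =>
      intro j b hb
      have h2 : (2:Nat) ^ (e+1) = 2 * 2 ^ e := by ring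
      show bitsW (j + e) (b / 2) ++ [Nat.digitChar (b % 2)] = _
      rw [ih j (b / 2) (by omega)]
      simp [bitsW]

lemma toDigits_length_of_bounds : ∀ (e n : Nat), 2 ^ e ≤ n → n < 2 ^ (e+1) →
    (Nat.toDigits 2 n).length = e + 1 := by
  intro e
  induction e with
  | zero =>
      intro n h1 h2
      have : n = 1 := by omega
      subst this; rfl
  | succ e ih =>
      intro n h1 h2
      have hp : (2:Nat) ^ (e+1) = 2 * 2 ^ e := by ring
      have hp2 : (2:Nat) ^ (e+2) = 2 * 2 ^ (e+1) := by ring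
      have hge : 2 ≤ n := by
        have := Nat.one_le_two_pow (n := e+1)
        omega
      rw [toDigits_two_rec n hge]
      have := ih (n / 2) (by omega) (by omega)
      simp [this]

lemma zfill_cons_eq (c : Char) (rest : List Char) (w : Int)
    (h1 : c ≠ '+') (h2 : c ≠ '-') :
    PySem.Chars.zfill (c :: rest) w
      = List.replicate (w.toNat - (c :: rest).length) '0' ++ c :: rest := by
  by_cases h : w ≤ ((c :: rest).length : Int)
  · unfold PySem.Chars.zfill
    rw [if_pos (by simpa using h)]
    have h0 : w.toNat - (c :: rest).length = 0 := by
      simp only [List.length_cons] at h ⊢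
      omega
    rw [h0]
    simp
  · unfold PySem.Chars.zfill
    rw [if_neg (by simpa using h)]
    show (if c = '+' ∨ c = '-' then c :: (List.replicate (w.toNat - (c :: rest).length) '0' ++ rest)
          else List.replicate (w.toNat - (c :: rest).length) '0' ++ c :: rest)
        = List.replicate (w.toNat - (c :: rest).length) '0' ++ c :: rest
    rw [if_neg (by tauto)]

-- A's output in closed form (everything up to here = the old proof path)
lemma A_canon (mess : Int) :
    fillFunc mess = String.ofList
      (let s := PySem.List.slice (PySem.Int.toBinChars0b mess) (some 2) none
       let m := PySem.List.pyRepeat ['0'] (PySem.Int.mod (-(PySem.List.len s)) 4) ++ s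
       let L := PySem.List.len m
       let k := PySem.Int.mod (448 - (L + 1)) 512
       m ++ '1' :: (PySem.List.pyRepeat ['0'] k ++ PySem.Chars.zfill (PySem.Int.toBinChars L) 64)) := by
  unfold fillFunc
  simp only [pad_eq, k_eq]
  rw [int2bin_eq _ (by simp only [PySem.List.len]; positivity)]

lemma bitsW_length : ∀ (e b : Nat), (bitsW e b).length = e := by
  intro e
  induction e with
  | zero => intro b; rfl
  | succ e ih => intro b; simp [bitsW, ih]

lemma digits_N0 (LN kN : Nat) (hLN : LN < 2 ^ 64) :
    Nat.toDigits 2 (2 ^ (kN + 64) + LN)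
      = '1' :: (List.replicate kN '0' ++ bitsW 64 LN) := by
  have hb : LN < 2 ^ (kN + 64) := by
    calc LN < 2 ^ 64 := hLN
    _ ≤ 2 ^ (kN + 64) := Nat.pow_le_pow_right (by omega) (by omega)
  have := toDigits_mul_pow_add (kN + 64) 1 LN (by omega) hb
  rw [one_mul] at this
  rw [this, bitsW_add 64 kN LN hLN]
  rfl

lemma digits_NN (mn LN kN : Nat) (hmn : 0 < mn) (hLN : LN < 2 ^ 64) :
    Nat.toDigits 2 (mn * 2 ^ (kN + 65) + (2 ^ (kN + 64) + LN))
      = Nat.toDigits 2 mn ++ '1' :: (List.replicate kN '0' ++ bitsW 64 LN) := by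
  have hb : LN < 2 ^ (kN + 64) := by
    calc LN < 2 ^ 64 := hLN
    _ ≤ 2 ^ (kN + 64) := Nat.pow_le_pow_right (by omega) (by omega)
  have h2 : (2:Nat) ^ (kN + 65) = 2 * 2 ^ (kN + 64) := by ring
  have hbb : 2 ^ (kN + 64) + LN < 2 ^ (kN + 65) := by rw [h2]; omega
  rw [toDigits_mul_pow_add (kN + 65) mn (2 ^ (kN + 64) + LN) hmn hbb]
  have hblen : (Nat.toDigits 2 (2 ^ (kN + 64) + LN)).length = kN + 65 := by
    rw [digits_N0 LN kN hLN]
    simp [bitsW_length]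
  have := bitsW_eq_replicate (kN + 65) (2 ^ (kN + 64) + LN) (by omega) hbb
  rw [hblen] at this
  simp only [Nat.sub_self, List.replicate_zero, List.nil_append] at this
  rw [this, digits_N0 LN kN hLN]

lemma toBinChars_natCast (n : Nat) : PySem.Int.toBinChars ((n : Nat) : Int) = Nat.toDigits 2 n := by
  simp [PySem.Int.toBinChars]

lemma zfill64_eq_bitsW (LN : Nat) (hLN : LN < 2 ^ 64) :
    PySem.Chars.zfill (PySem.Int.toBinChars ((LN : Nat) : Int)) 64 = bitsW 64 LN := by
  have htb : PySem.Int.toBinChars ((LN : Nat) : Int) = Nat.toDigits 2 LN := by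
    simp [PySem.Int.toBinChars]
  rw [htb, bitsW_eq_replicate 64 LN (by norm_num) hLN]
  obtain ⟨c, rest, hcr⟩ : ∃ c rest, Nat.toDigits 2 LN = c :: rest := by
    rcases hh : Nat.toDigits 2 LN with _ | ⟨c, r⟩
    · exact absurd hh (toDigits_two_ne_nil LN)
    · exact ⟨c, r, rfl⟩
  have hc := toDigits_not_sign LN c (by rw [hcr]; exact List.mem_cons_self)
  rw [hcr, zfill_cons_eq c rest 64 hc.1 hc.2]
  rfl

-- ===== VERDICT (by name: the statement is the Claim_ definition above) =====
set_option maxHeartbeats 1600000 in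
set_option maxRecDepth 8192 in
theorem fillFunc_spec : Claim_equal_fillFunc := by
  intro mess hdom hpre
  unfold Spec_fillFunc
  have hpre' : 0 ≤ mess := hpre
  have hdom' : mess ≤ 2147483648 := by
    unfold Dom_fillFunc pvDomInt at hdom
    simp only [decide_eq_true_eq] at hdom
    exact hdom.2
  -- names
  have hmess : mess = (mess.toNat : Int) := (Int.toNat_of_nonneg hpre').symm
  set mn := mess.toNat with hmn
  set d := Nat.toDigits 2 mn with hd
  set len := d.length with hlend
  have hlen1 : 1 ≤ len := List.length_pos_iff.mpr (toDigits_two_ne_nil mn)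
  have hmn32 : mn < 2 ^ 32 := by
    have h31 : (2147483648 : Nat) < 2 ^ 32 := by norm_num
    omega
  have hlen32 : len ≤ 32 :=
    Nat.toDigits_length 2 mn 32 (by norm_num) hmn32
  -- bit length vs digit count
  have hbl : max (PySem.Int.bitLength mess) 1 = len := by
    rcases Nat.eq_zero_or_pos mn with h0 | hpos
    · have hz : mess = 0 := by omega
      have hdz : d = ['0'] := by rw [hd, h0]; decide
      rw [hz, hlend, hdz]
      simp [PySem.Int.bitLength_zero]
    · have hne : mess ≠ 0 := by omega
      have hub := PySem.Int.lt_two_pow_bitLength mess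
      have hlb := PySem.Int.two_pow_bitLength_le mess hne
      have hna : mess.natAbs = mn := by omega
      rw [hna] at hub hlb
      set bl := PySem.Int.bitLength mess with hblv
      have hbl1 : 1 ≤ bl := by
        by_contra h
        have : bl = 0 := by omega
        rw [this] at hub
        simp at hub
        omega
      have hlenbl : len = bl := by
        have := toDigits_length_of_bounds (bl - 1) mn hlb (by
          have : bl - 1 + 1 = bl := by omega
          rw [this]; exact hub)
        rw [← hd] at this
        omega
      omega
  -- Nat-level parameters
  set LN := (len + 3) / 4 * 4 with hLN
  have hLNlen : len ≤ LN := by omega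
  have hLN32 : LN ≤ 32 := by omega
  set kN := 447 - LN with hkN
  clear_value mn d len LN kN
  have hLN64 : LN < 2 ^ 64 := by
    have : (32:Nat) < 2 ^ 64 := by norm_num
    omega
  -- the Int-side L of B
  have hLint : PySem.Int.floordiv (max ((PySem.Int.bitLength mess : Nat) : Int) 1 + 3) 4 * 4
      = ((LN : Nat) : Int) := by
    have h1 : (max ((PySem.Int.bitLength mess : Nat) : Int) 1 + 3) = ((len + 3 : Nat) : Int) := by
      rw [← hbl]
      push_cast
      ring
    rw [h1, show (4:Int) = ((4:Nat):Int) from rfl, PySem.Int.floordiv_natCast]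
    omega
  -- the Int-side k (same expression on both sides)
  have hkint : PySem.Int.mod (448 - (((LN:Nat):Int) + 1)) 512 = ((kN : Nat) : Int) := by
    have h1 : (448 - (((LN:Nat):Int) + 1)) = ((kN : Nat) : Int) := by omega
    rw [h1, PySem.Int.mod_eq_emod_of_pos (by norm_num)]
    rw [Int.emod_eq_of_lt (by positivity) (by omega)]
  -- A side into closed form
  have hs : PySem.List.slice (PySem.Int.toBinChars0b mess) (some 2) none = d := by
    rw [PySem.List.slice_from _ (by norm_num : (0:Int) ≤ 2)]
    have h1 : PySem.Int.toBinChars0b mess = '0' :: 'b' :: d := by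
      simp [PySem.Int.toBinChars0b, not_lt.mpr hpre', hd, hmn]
    rw [h1]
    rfl
  have hpadi : PySem.Int.mod (-(PySem.List.len d)) 4 = ((LN - len : Nat) : Int) := by
    simp only [PySem.List.len, mod_four_eq, ← hlend]
    omega
  rw [A_canon]
  dsimp only
  rw [hs, hpadi, PySem.List.pyRepeat_singleton, Int.toNat_natCast]
  have hmlen : PySem.List.len (List.replicate (LN - len) '0' ++ d) = ((LN : Nat) : Int) := by
    simp only [PySem.List.len, List.length_append, List.length_replicate, ← hlend]
    omega
  rw [hmlen, hkint, PySem.List.pyRepeat_singleton, Int.toNat_natCast,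
      zfill64_eq_bitsW LN hLN64]
  -- B side
  unfold fillFunc_alt
  dsimp only
  rw [hLint, hkint]
  have e1 : ((1 : Int) + ((kN:Nat):Int) + 64).toNat = kN + 65 := by omega
  have e2 : (((kN:Nat):Int) + 64).toNat = kN + 64 := by omega
  rw [e1, e2, Int.shiftLeft_eq]
  have hNint : mess * (2:Int) ^ (kN + 65) + ((1 <<< (kN + 64) : Nat) : Int) + ((LN:Nat):Int)
      = (((mn * 2 ^ (kN + 65) + (2 ^ (kN + 64) + LN) : Nat)) : Int) := by
    rw [Nat.shiftLeft_eq, hmess]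
    push_cast
    ring
  rw [hNint]
  have htbN : PySem.Int.toBinChars (((mn * 2 ^ (kN + 65) + (2 ^ (kN + 64) + LN) : Nat)) : Int)
      = Nat.toDigits 2 (mn * 2 ^ (kN + 65) + (2 ^ (kN + 64) + LN)) :=
    toBinChars_natCast _
  rw [htbN]
  have hw : (((LN:Nat):Int) + 1 + ((kN:Nat):Int) + 64) = ((LN + 65 + kN : Nat) : Int) := by
    push_cast
    ring
  rw [hw]
  rcases Nat.eq_zero_or_pos mn with h0 | hpos
  · -- mess = 0
    have hdz : d = ['0'] := by rw [hd, h0]; decide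
    have hlen' : len = 1 := by rw [hlend, hdz]; rfl
    have hNN0 : mn * 2 ^ (kN + 65) + (2 ^ (kN + 64) + LN) = 2 ^ (kN + 64) + LN := by
      rw [h0]; ring
    rw [hNN0, digits_N0 LN kN hLN64,
        zfill_cons_eq '1' _ _ (by decide) (by decide)]
    have hcnt : (((LN + 65 + kN : Nat) : Int)).toNat
        - ('1' :: (List.replicate kN '0' ++ bitsW 64 LN)).length = LN := by
      simp only [List.length_cons, List.length_append, List.length_replicate, bitsW_length]
      omega
    rw [hcnt, hdz, hlen']
    congr 1
    rw [show List.replicate LN '0' = List.replicate (LN - 1) '0' ++ ['0'] by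
          rw [← List.replicate_succ']; congr 1; omega]
    try simp [List.append_assoc]
  · -- mess > 0
    rw [digits_NN mn LN kN hpos hLN64, ← hd]
    obtain ⟨c, rest, hcr⟩ : ∃ c rest, d = c :: rest := by
      rcases hh : d with _ | ⟨c, r⟩
      · exact absurd (hd ▸ hh) (toDigits_two_ne_nil mn)
      · exact ⟨c, r, rfl⟩
    have hc := toDigits_not_sign mn c (by rw [← hd, hcr]; exact List.mem_cons_self)
    rw [hcr]
    simp only [List.cons_append]
    rw [zfill_cons_eq c _ _ hc.1 hc.2]
    have hcnt : (((LN + 65 + kN : Nat) : Int)).toNat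
        - (c :: (rest ++ '1' :: (List.replicate kN '0' ++ bitsW 64 LN))).length = LN - len := by
      simp only [List.length_cons, List.length_append, List.length_replicate, bitsW_length]
      have hlr : len = rest.length + 1 := by rw [hlend, hcr]; rfl
      omega
    rw [hcnt]
    simp [List.append_assoc]
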